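-- pv_equiv track=rewrite | github.com/pypi-data/pypi-mirror-402 | packages/pytrate/pytrate-2.4.1-py3-none-any.whl/pytrate/helper.py | find_maximal_subsets
-- ===== SOURCE A (Python) =====
-- from collections import namedtuple, defaultdict
--
-- def find_maximal_subsets(sets: list[set]) -> set[frozenset]:
--     """
--     Find the maximal subsets of items that always appear together in a group of sets.
--
--     Args:
--         sets (list[set]): Group of sets.
--
--     Returns:
--         set[frozenset]: A set of frozensets representing the maximal subsets of items
--             that always appear together.
--     """
--     if not sets:
--         return set()
--
--     frozen_sets = [frozenset(s) for s in sets]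
--
--     # dictionary that maps each item to the sets it appears in
--     item_to_sets = defaultdict(set)
--     all_items = set()
--     for i, s in enumerate(frozen_sets):
--         for item in s:
--             item_to_sets[item].add(i)
--             all_items.add(item)
--
--     # group items that appear in exactly the same sets
--     signature_to_items = defaultdict(set)
--     for item in all_items:
--         signature = frozenset(item_to_sets[item])
--         signature_to_items[signature].add(item)
--
--     # each group of items with the same signature forms a maximal subset
--     maximal_subsets = set()
--     for items in signature_to_items.values():
--         if items:  # skip empty sets
--             maximal_subsets.add(frozenset(items))
--
--     return maximal_subsets
-- ===== SOURCE B (Python) =====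
-- def find_maximal_subsets(sets: list[set]) -> set[frozenset]:
--     """Group items by their membership signature, computed per item by
--     scanning all sets (no incidence table)."""
--     if not sets:
--         return set()
--
--     frozen = [frozenset(s) for s in sets]
--     groups = {}
--     seen = set()
--     for s in frozen:
--         for item in s:
--             if item in seen:
--                 continue
--             seen.add(item)
--             sig = tuple(i for i, t in enumerate(frozen) if item in t)
--             groups.setdefault(sig, set()).add(item)
--
--     return {frozenset(v) for v in groups.values()}
-- ===== Notes on version B (the rewrite author's own statement) =====
-- stated objective: alternative
-- what changed: B drops A's single-pass item->set-indices incidence table and instead computes each item's membership signature by scanning all sets per first-seen item, grouping directly into a signature-keyed dict in one nested pass.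
import Mathlib
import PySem

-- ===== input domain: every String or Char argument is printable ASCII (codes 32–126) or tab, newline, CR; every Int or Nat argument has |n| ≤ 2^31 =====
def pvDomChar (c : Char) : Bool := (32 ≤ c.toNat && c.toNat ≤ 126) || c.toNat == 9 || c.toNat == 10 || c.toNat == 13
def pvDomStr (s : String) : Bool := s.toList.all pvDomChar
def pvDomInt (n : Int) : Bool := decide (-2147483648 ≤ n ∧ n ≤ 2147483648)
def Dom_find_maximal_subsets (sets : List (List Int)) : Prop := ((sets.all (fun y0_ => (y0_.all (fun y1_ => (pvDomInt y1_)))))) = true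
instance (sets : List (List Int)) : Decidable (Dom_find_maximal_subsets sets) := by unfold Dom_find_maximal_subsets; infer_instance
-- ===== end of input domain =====

-- B replaces A's incidence table by a per-item scan of all sets (alternative algorithm, not faster);
-- Python sets/frozensets are modelled as PySem.Set, outputs are compared as sets of sets.

-- ===== PORT A =====
def find_maximal_subsets (sets : List (List Int)) : List (List Int) :=
  if sets = [] then []
  else
    let frozen_sets := sets.map (fun s => PySem.Set.ofList s)
    -- dictionary that maps each item to the sets it appears in, plus all_items
    let st := (PySem.List.enumerate frozen_sets).foldl
        (fun (st : PySem.Dict Int (PySem.Set Int) × PySem.Set Int) p =>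
          p.2.foldl
            (fun st item =>
              (st.1.modify item PySem.Set.empty (fun v => PySem.Set.add v p.1),
               PySem.Set.add st.2 item))
            st)
        (PySem.Dict.empty, PySem.Set.empty)
    -- group items that appear in exactly the same sets
    let sig2items := st.2.foldl
        (fun (d : PySem.Dict (List Int) (PySem.Set Int)) item =>
          d.modify (st.1.getD item PySem.Set.empty) PySem.Set.empty
            (fun v => PySem.Set.add v item))
        PySem.Dict.empty
    -- each group of items with the same signature forms a maximal subset
    sig2items.values.foldl
      (fun (acc : PySem.Set (List Int)) items =>
        if items ≠ [] then PySem.Set.add acc items else acc)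
      PySem.Set.empty

-- ===== PORT B =====
def find_maximal_subsets_alt (sets : List (List Int)) : List (List Int) :=
  if sets = [] then []
  else
    let frozen := sets.map (fun s => PySem.Set.ofList s)
    let st := frozen.foldl
        (fun (st : PySem.Dict (List Int) (PySem.Set Int) × PySem.Set Int) s =>
          s.foldl
            (fun st item =>
              if PySem.Set.contains st.2 item then st
              else
                (st.1.modify
                    (((PySem.List.enumerate frozen).filter
                        (fun p => PySem.Set.contains p.2 item)).map (fun p => p.1))
                    PySem.Set.empty (fun v => PySem.Set.add v item),
                 PySem.Set.add st.2 item))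
            st)
        (PySem.Dict.empty, PySem.Set.empty)
    PySem.Set.ofList st.1.values

-- ===== PRECONDITION & SPEC =====
def Spec_find_maximal_subsets (sets : List (List Int)) (out : List (List Int)) : Prop := out = find_maximal_subsets_alt sets
instance (sets : List (List Int)) (out : List (List Int)) : Decidable (Spec_find_maximal_subsets sets out) := by unfold Spec_find_maximal_subsets; infer_instance

-- ===== CLAIM (what is proved, stated in full; the proofs are below) =====
def Claim_equal_find_maximal_subsets : Prop := ∀ (sets : List (List Int)), Dom_find_maximal_subsets sets → Spec_find_maximal_subsets sets (find_maximal_subsets sets)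


-- ===== LEMMAS AND PROOFS =====

-- facts about PySem.Set.add specific to how the two loops use it
theorem pv_contains_iff {α : Type} [BEq α] [LawfulBEq α] (s : PySem.Set α) (x : α) :
    PySem.Set.contains s x = true ↔ x ∈ s := by
  simp [PySem.Set.contains]

theorem pv_add_ne_nil {α : Type} [BEq α] [LawfulBEq α] (s : PySem.Set α) (x : α) :
    PySem.Set.add s x ≠ [] := by
  unfold PySem.Set.add
  split_ifs with h
  · rcases s with _ | ⟨a, t⟩
    · simp [PySem.Set.contains] at h
    · simp
  · simp

theorem pv_add_of_contains {α : Type} [BEq α] (s : PySem.Set α) (x : α)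
    (h : PySem.Set.contains s x = true) : PySem.Set.add s x = s := by
  unfold PySem.Set.add; rw [if_pos h]

theorem pv_add_of_not_contains {α : Type} [BEq α] (s : PySem.Set α) (x : α)
    (h : ¬ PySem.Set.contains s x = true) : PySem.Set.add s x = s ++ [x] := by
  unfold PySem.Set.add; rw [if_neg h]

theorem pv_add_idem {α : Type} [BEq α] [LawfulBEq α] (s : PySem.Set α) (x : α) :
    PySem.Set.add (PySem.Set.add s x) x = PySem.Set.add s x := by
  by_cases h : PySem.Set.contains s x = true
  · rw [pv_add_of_contains s x h, pv_add_of_contains s x h]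
  · rw [pv_add_of_not_contains s x h]
    have hc : PySem.Set.contains (s ++ [x]) x = true := by
      rw [pv_contains_iff]; simp
    rw [pv_add_of_contains _ _ hc]

-- the getD-value of A's inner (one set) incidence update
theorem pv_inner_getD (i item : Int) :
    ∀ (s : List Int) (d : PySem.Dict Int (PySem.Set Int)),
    (s.foldl (fun d it => d.modify it PySem.Set.empty (fun v => PySem.Set.add v i)) d).getD item PySem.Set.empty
      = if PySem.Set.contains s item = true
          then PySem.Set.add (d.getD item PySem.Set.empty) i
          else d.getD item PySem.Set.empty := by
  intro s
  induction s with
  | nil => intro d; simp [PySem.Set.contains]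
  | cons a t ih =>
    intro d
    simp only [List.foldl_cons, ih]
    by_cases ha : item = a
    · subst ha
      have hc : PySem.Set.contains (item :: t) item = true := by
        rw [pv_contains_iff]; simp
      rw [PySem.Dict.getD_modify]
      simp only [hc]
      by_cases ht : PySem.Set.contains t item = true
      · simp only [ht, if_true, pv_add_idem]
      · have htf : PySem.Set.contains t item = false := by
          simpa using ht
        simp only [htf, Bool.false_eq_true, if_false, if_true]
    · rw [PySem.Dict.getD_modify]
      simp only [if_neg ha]
      by_cases hm : item ∈ t
      · have h1 : PySem.Set.contains (a :: t) item = true := by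
          rw [pv_contains_iff]; simp [hm]
        have h2 : PySem.Set.contains t item = true := by
          rw [pv_contains_iff]; exact hm
        simp only [h1, h2]
      · have h1 : PySem.Set.contains (a :: t) item = false := by
          have : ¬ PySem.Set.contains (a :: t) item = true := by
            rw [pv_contains_iff]; simp [ha, hm]
          simpa using this
        have h2 : PySem.Set.contains t item = false := by
          have : ¬ PySem.Set.contains t item = true := by
            rw [pv_contains_iff]; exact hm
          simpa using this
        simp only [h1, h2]

-- the getD-value of A's whole incidence loop: exactly the indices of the sets containing item
theorem pv_outer_getD (item : Int) :
    ∀ (L : List (Int × List Int)) (d : PySem.Dict Int (PySem.Set Int)),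
    (L.foldl (fun d p => p.2.foldl
        (fun d it => d.modify it PySem.Set.empty (fun v => PySem.Set.add v p.1)) d) d).getD item PySem.Set.empty
      = PySem.Set.update (d.getD item PySem.Set.empty)
          ((L.filter (fun p => PySem.Set.contains p.2 item)).map (fun p => p.1)) := by
  intro L
  induction L with
  | nil => intro d; simp [PySem.Set.update]
  | cons p rest ih =>
    intro d
    simp only [List.foldl_cons]
    rw [ih, pv_inner_getD]
    by_cases hc : PySem.Set.contains p.2 item = true
    · simp only [hc, if_true, List.filter_cons, List.map_cons]
      simp only [PySem.Set.update, List.foldl_cons]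
    · have hcf : PySem.Set.contains p.2 item = false := by simpa using hc
      simp only [hcf, Bool.false_eq_true, if_false, List.filter_cons]

theorem pv_sig_nodup (frozen : List (List Int)) (item : Int) :
    ((((PySem.List.enumerate frozen).filter
        (fun p => PySem.Set.contains p.2 item)).map (fun p => p.1))).Nodup := by
  have h := (PySem.List.pairwise_lt_enumerate frozen 0).filter
      (fun p => PySem.Set.contains p.2 item)
  simp only [List.Nodup, List.pairwise_map]
  exact h.imp (fun hlt => ne_of_lt hlt)

theorem pv_update_fresh {α : Type} [BEq α] [LawfulBEq α] :
    ∀ (l : List α) (s : PySem.Set α), l.Nodup → (∀ x ∈ l, x ∉ s) →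
    PySem.Set.update s l = s ++ l := by
  intro l
  induction l with
  | nil => intro s _ _; simp [PySem.Set.update]
  | cons x t ih =>
    intro s hnd hfr
    have hx : ¬ PySem.Set.contains s x = true := by
      rw [pv_contains_iff]; exact hfr x (by simp)
    have : PySem.Set.update s (x :: t) = PySem.Set.update (s ++ [x]) t := by
      simp [PySem.Set.update, pv_add_of_not_contains s x hx]
    rw [this, ih (s ++ [x]) hnd.of_cons]
    · simp
    · intro y hy
      simp only [List.mem_append, List.mem_singleton]
      rintro (h | rfl)
      · exact hfr y (by simp [hy]) h
      · exact (List.nodup_cons.mp hnd).1 hy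

theorem pv_ofList_nodup {α : Type} [BEq α] [LawfulBEq α] (l : List α) (h : l.Nodup) :
    PySem.Set.ofList l = l := by
  have := pv_update_fresh l [] h (by simp)
  simpa [PySem.Set.update, PySem.Set.ofList, PySem.Set.empty] using this

-- B's seen-skip loop is a plain fold over the not-yet-seen elements
def pvNews : PySem.Set Int → List Int → List Int
  | _, [] => []
  | seen, x :: xs =>
    if PySem.Set.contains seen x then pvNews seen xs
    else x :: pvNews (PySem.Set.add seen x) xs

theorem pv_seen_fold (G : PySem.Dict (List Int) (PySem.Set Int) → Int → PySem.Dict (List Int) (PySem.Set Int)) :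
    ∀ (xs : List Int) (d : PySem.Dict (List Int) (PySem.Set Int)) (seen : PySem.Set Int),
    xs.foldl (fun st item => if PySem.Set.contains st.2 item then st
        else (G st.1 item, PySem.Set.add st.2 item)) (d, seen)
      = ((pvNews seen xs).foldl G d, PySem.Set.update seen xs) := by
  intro xs
  induction xs with
  | nil => intro d seen; simp [pvNews, PySem.Set.update]
  | cons x t ih =>
    intro d seen
    by_cases hc : PySem.Set.contains seen x = true
    · simp only [List.foldl_cons, hc, if_true, ih, pvNews]
      rw [show PySem.Set.update seen (x :: t) = PySem.Set.update seen t by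
        simp [PySem.Set.update, pv_add_of_contains seen x hc]]
    · have hcf : PySem.Set.contains seen x = false := by simpa using hc
      simp only [List.foldl_cons, hcf, Bool.false_eq_true, if_false, ih, pvNews]
      rfl

theorem pv_update_eq_append_news :
    ∀ (xs : List Int) (seen : PySem.Set Int),
    PySem.Set.update seen xs = seen ++ pvNews seen xs := by
  intro xs
  induction xs with
  | nil => intro seen; simp [pvNews, PySem.Set.update]
  | cons x t ih =>
    intro seen
    by_cases hc : PySem.Set.contains seen x = true
    · have h1 : PySem.Set.update seen (x :: t) = PySem.Set.update seen t := by
        simp [PySem.Set.update, pv_add_of_contains seen x hc]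
      have hm : x ∈ seen := (pv_contains_iff _ _).1 hc
      rw [h1, ih]
      simp [pvNews, hm]
    · have hcf : PySem.Set.contains seen x = false := by simpa using hc
      have h1 : PySem.Set.update seen (x :: t) = PySem.Set.update (seen ++ [x]) t := by
        simp [PySem.Set.update, pv_add_of_not_contains seen x hc]
      rw [h1, ih (seen ++ [x])]
      have hm : x ∉ seen := fun h => hc ((pv_contains_iff _ _).2 h)
      have h2 : pvNews seen (x :: t) = x :: pvNews (seen ++ [x]) t := by
        simp [pvNews, hm]
      rw [h2]
      simp

theorem pv_news_empty (xs : List Int) : pvNews PySem.Set.empty xs = PySem.Set.ofList xs := by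
  have := pv_update_eq_append_news xs PySem.Set.empty
  simpa [PySem.Set.update, PySem.Set.ofList, PySem.Set.empty] using this.symm

-- every value in the grouping dict is nonempty
theorem pv_values_ne_nil (key : Int → List Int) :
    ∀ (U : List Int) (d : PySem.Dict (List Int) (PySem.Set Int)),
    (∀ v ∈ d.values, v ≠ []) →
    ∀ v ∈ (U.foldl (fun d item => d.modify (key item) PySem.Set.empty
        (fun v => PySem.Set.add v item)) d).values, v ≠ [] := by
  intro U
  induction U with
  | nil => intro d h; simpa using h
  | cons x t ih =>
    intro d h
    simp only [List.foldl_cons]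
    refine ih _ ?_
    intro v hv
    rcases PySem.Dict.mem_values_insert _ _ _ _ hv with rfl | hv'
    · exact pv_add_ne_nil _ _
    · exact h v hv'

-- a fold over the second components only
theorem pv_foldl_snd (L : List (Int × List Int)) :
    ∀ u : PySem.Set Int,
    L.foldl (fun u p => p.2.foldl PySem.Set.add u) u
      = (L.map (fun p => p.2)).foldl (fun u s => s.foldl PySem.Set.add u) u := by
  induction L with
  | nil => intro u; simp
  | cons p rest ih => intro u; simp [ih]

-- split A's simultaneous (dict, all_items) loop into two independent folds
theorem pv_pair_split (frozen : List (List Int)) (a : PySem.Dict Int (PySem.Set Int)) (b : PySem.Set Int) :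
    (PySem.List.enumerate frozen).foldl
      (fun (st : PySem.Dict Int (PySem.Set Int) × PySem.Set Int) p =>
        p.2.foldl
          (fun st item =>
            (st.1.modify item PySem.Set.empty (fun v => PySem.Set.add v p.1),
             PySem.Set.add st.2 item))
          st)
      (a, b)
    = ((PySem.List.enumerate frozen).foldl
        (fun d p => p.2.foldl (fun d it => PySem.Dict.modify d it PySem.Set.empty (fun v => PySem.Set.add v p.1)) d) a,
       (PySem.List.enumerate frozen).foldl (fun u p => p.2.foldl PySem.Set.add u) b) := by
  have hbody : (fun (st : PySem.Dict Int (PySem.Set Int) × PySem.Set Int) (p : Int × List Int) =>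
        p.2.foldl
          (fun st item =>
            (st.1.modify item PySem.Set.empty (fun v => PySem.Set.add v p.1),
             PySem.Set.add st.2 item))
          st)
      = (fun st p =>
          (p.2.foldl (fun d it => PySem.Dict.modify d it PySem.Set.empty (fun v => PySem.Set.add v p.1)) st.1,
           p.2.foldl PySem.Set.add st.2)) := by
    funext st p
    cases st with
    | mk a b =>
      exact PySem.List.foldl_prod_mk
        (f := fun d it => PySem.Dict.modify d it PySem.Set.empty (fun v => PySem.Set.add v p.1))
        (g := PySem.Set.add) p.2 a b
  rw [hbody]
  exact PySem.List.foldl_prod_mk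
    (f := fun (d : PySem.Dict Int (PySem.Set Int)) (p : Int × List Int) =>
      p.2.foldl (fun d it => PySem.Dict.modify d it PySem.Set.empty (fun v => PySem.Set.add v p.1)) d)
    (g := fun (u : PySem.Set Int) (p : Int × List Int) => p.2.foldl PySem.Set.add u) _ a b

-- ===== VERDICT (by name: the statement is the Claim_ definition above) =====
theorem find_maximal_subsets_spec : Claim_equal_find_maximal_subsets := by
  unfold Claim_equal_find_maximal_subsets Spec_find_maximal_subsets
  intro sets _
  by_cases hs : sets = []
  · simp [find_maximal_subsets, find_maximal_subsets_alt, hs]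
  · simp only [find_maximal_subsets, find_maximal_subsets_alt, if_neg hs]
    rw [pv_pair_split]
    -- all_items is the set of all elements, in first-occurrence order
    have hU : (PySem.List.enumerate (sets.map (fun s => PySem.Set.ofList s))).foldl
        (fun u p => p.2.foldl PySem.Set.add u) PySem.Set.empty
        = PySem.Set.ofList (sets.map (fun s => PySem.Set.ofList s)).flatten := by
      rw [pv_foldl_snd, PySem.List.map_snd_enumerate, ← List.foldl_flatten,
        PySem.Set.ofList_eq_foldl]
      rfl
    -- A's incidence-table lookup is B's per-item signature
    have hM : ∀ item : Int,
        ((PySem.List.enumerate (sets.map (fun s => PySem.Set.ofList s))).foldl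
          (fun d p => p.2.foldl (fun d it => PySem.Dict.modify d it PySem.Set.empty (fun v => PySem.Set.add v p.1)) d)
          PySem.Dict.empty).getD item PySem.Set.empty
        = ((PySem.List.enumerate (sets.map (fun s => PySem.Set.ofList s))).filter
            (fun p => PySem.Set.contains p.2 item)).map (fun p => p.1) := by
      intro item
      rw [pv_outer_getD, PySem.Dict.getD_empty]
      have : PySem.Set.update (PySem.Set.empty : PySem.Set Int)
          (((PySem.List.enumerate (sets.map (fun s => PySem.Set.ofList s))).filter
            (fun p => PySem.Set.contains p.2 item)).map (fun p => p.1))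
          = PySem.Set.ofList (((PySem.List.enumerate (sets.map (fun s => PySem.Set.ofList s))).filter
            (fun p => PySem.Set.contains p.2 item)).map (fun p => p.1)) := rfl
      rw [this, pv_ofList_nodup _ (pv_sig_nodup _ item)]
    simp only [hU, hM]
    -- B's seen-skipping nested loop is a plain fold over the distinct items
    rw [← List.foldl_flatten,
      pv_seen_fold (fun d item => PySem.Dict.modify d
        (((PySem.List.enumerate (sets.map (fun s => PySem.Set.ofList s))).filter
          (fun p => PySem.Set.contains p.2 item)).map (fun p => p.1))
        PySem.Set.empty (fun v => PySem.Set.add v item)),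
      pv_news_empty]
    -- the grouping dicts now coincide; finish by dropping A's vacuous emptiness guard
    have hvals : ∀ v ∈ (((PySem.Set.ofList (sets.map (fun s => PySem.Set.ofList s)).flatten)).foldl
        (fun d item => PySem.Dict.modify d
          (((PySem.List.enumerate (sets.map (fun s => PySem.Set.ofList s))).filter
            (fun (p : Int × List Int) => PySem.Set.contains p.2 item)).map (fun p => p.1))
          PySem.Set.empty (fun v => PySem.Set.add v item))
        PySem.Dict.empty).values, v ≠ [] := by
      apply pv_values_ne_nil
      intro v hv
      simp [PySem.Dict.values, PySem.Dict.empty] at hv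
    rw [PySem.Set.ofList_eq_foldl]
    apply PySem.List.foldl_congr_mem'
    intro x hx acc
    rw [if_pos (hvals x hx)]
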